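-- pv_equiv track=rewrite | github.com/KodCode-AI/kodcode | demo/SFT_KodCode_prefill_200_1741214325/cross_verification_SFT_KodCode_prefill_200_1741214325/Prefill_00000069_C/trial_r1_0/solution.py | count_trailing_zeros
-- ===== SOURCE A (Python) =====
-- def count_trailing_zeros(number: int) -> int:
--     """
--     Counts and returns the number of trailing zeros in the given integer.
--     """
--     if number == 0:
--         return 1  # Special case where the number itself is 0
--     count = 0
--     while number % 10 == 0:
--         count += 1
--         number //= 10
--     return count
-- ===== SOURCE B (Python) =====
-- def count_trailing_zeros(number: int) -> int:
--     """
--     Counts and returns the number of trailing zeros in the given integer.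
--     """
--     s = str(number)
--     return len(s) - len(s.rstrip('0'))
-- ===== Notes on version B (the rewrite author's own statement) =====
-- stated objective: idiomatic
-- what changed: Replaces the modulo/floordiv while-loop with decimal-string suffix inspection: len(str(n)) - len(str(n).rstrip('0')), which also covers the 0 special case ('0'.rstrip('0') == '') without a branch.
import Mathlib
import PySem

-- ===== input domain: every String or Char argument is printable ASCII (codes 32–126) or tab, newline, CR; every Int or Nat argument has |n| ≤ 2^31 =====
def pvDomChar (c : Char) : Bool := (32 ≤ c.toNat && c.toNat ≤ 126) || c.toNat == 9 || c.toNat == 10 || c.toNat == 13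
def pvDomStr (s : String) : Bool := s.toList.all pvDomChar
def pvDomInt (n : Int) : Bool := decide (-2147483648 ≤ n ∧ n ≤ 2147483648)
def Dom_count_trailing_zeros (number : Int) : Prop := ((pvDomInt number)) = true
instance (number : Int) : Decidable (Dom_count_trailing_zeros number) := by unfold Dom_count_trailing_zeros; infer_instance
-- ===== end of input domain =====

-- B replaces A's modulo/floor-division while-loop by decimal-string suffix inspection
-- (len(str(n)) - len(str(n).rstrip('0'))), same return value for every int.

-- ===== PORT A =====
-- the `while number % 10 == 0` loop; fuel = |number| is enough iterations for any nonzero start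
def ctzLoop : Nat → Int → Int → Int
  | 0, _, count => count
  | fuel + 1, n, count =>
    if PySem.Int.mod n 10 = 0 then ctzLoop fuel (PySem.Int.floordiv n 10) (count + 1)
    else count

def count_trailing_zeros (number : Int) : Int :=
  if number = 0 then 1
  else ctzLoop number.natAbs number 0

-- ===== PORT B =====
-- s.rstrip('0') is ported by hand as reverse / dropWhile (== '0') / reverse (exact for any string)
def count_trailing_zeros_alt (number : Int) : Int :=
  let s := PySem.Int.toChars number
  let stripped := (s.reverse.dropWhile (fun c => c == '0')).reverse
  (s.length : Int) - (stripped.length : Int)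

-- ===== PRECONDITION & SPEC =====
def Spec_count_trailing_zeros (number : Int) (out : Int) : Prop := out = count_trailing_zeros_alt number
instance (number : Int) (out : Int) : Decidable (Spec_count_trailing_zeros number out) := by unfold Spec_count_trailing_zeros; infer_instance

-- ===== CLAIM (what is proved, stated in full; the proofs are below) =====
def Claim_equal_count_trailing_zeros : Prop := ∀ (number : Int), Dom_count_trailing_zeros number → Spec_count_trailing_zeros number (count_trailing_zeros number)

-- ===== LEMMAS AND PROOFS =====

-- number of low-order zero digits of a natural number
def Z (m : Nat) : Nat := ((Nat.digits 10 m).takeWhile (fun d => d == 0)).length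

theorem toDigitsCore_acc (fuel n : Nat) (ds : List Char) :
    Nat.toDigitsCore 10 fuel n ds = Nat.toDigitsCore 10 fuel n [] ++ ds := by
  induction fuel generalizing n ds with
  | zero => simp [Nat.toDigitsCore]
  | succ fuel ih =>
    simp only [Nat.toDigitsCore]
    by_cases h : n / 10 = 0
    · simp [h]
    · simp only [h, if_false]
      rw [ih (n / 10) [(n % 10).digitChar], ih (n / 10) ((n % 10).digitChar :: ds)]
      simp

theorem toDigitsCore_eq (fuel n : Nat) (h0 : 0 < n) (h : n ≤ fuel) :
    Nat.toDigitsCore 10 fuel n [] = ((Nat.digits 10 n).map Nat.digitChar).reverse := by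
  induction fuel generalizing n with
  | zero => omega
  | succ fuel ih =>
    simp only [Nat.toDigitsCore]
    rw [Nat.digits_def' (by norm_num : 1 < 10) h0]
    by_cases hq : n / 10 = 0
    · simp [hq]
    · simp only [hq, if_false]
      rw [toDigitsCore_acc, ih (n / 10) (Nat.pos_of_ne_zero hq) (by omega : n / 10 ≤ fuel)]
      simp

theorem toDigits_eq (n : Nat) (h : 0 < n) :
    Nat.toDigits 10 n = ((Nat.digits 10 n).map Nat.digitChar).reverse :=
  toDigitsCore_eq (n + 1) n h (by omega)

theorem digitChar_zero_iff (d : Nat) (hd : d < 10) :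
    (Nat.digitChar d == '0') = (d == 0) := by
  interval_cases d <;> decide

theorem takeWhile_map_digitChar (l : List Nat) (h : ∀ d ∈ l, d < 10) :
    ((l.map Nat.digitChar).takeWhile (fun c => c == '0')).length
      = (l.takeWhile (fun d => d == 0)).length := by
  induction l with
  | nil => simp
  | cons d l ih =>
    have hd : d < 10 := h d (by simp)
    simp only [List.map_cons, List.takeWhile_cons, digitChar_zero_iff d hd]
    by_cases hz : d = 0
    · subst hz; simpa using ih (fun x hx => h x (by simp [hx]))
    · simp [hz]

-- the trailing-zero count of the digit string of a positive natural is Z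
theorem takeWhile_rev_toDigits (m : Nat) (h : 0 < m) :
    (((Nat.toDigits 10 m).reverse).takeWhile (fun c => c == '0')).length = Z m := by
  rw [toDigits_eq m h, List.reverse_reverse, Z]
  exact takeWhile_map_digitChar _ (fun d hd => Nat.digits_lt_base (by norm_num) hd)

theorem Z_lt_length (m : Nat) (h : 0 < m) : Z m < (Nat.digits 10 m).length := by
  have hle : Z m ≤ (Nat.digits 10 m).length :=
    (List.takeWhile_sublist (l := Nat.digits 10 m) (fun d => d == 0)).length_le
  rcases Nat.lt_or_ge (Z m) (Nat.digits 10 m).length with hlt | hge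
  · exact hlt
  · exfalso
    have heq : (Nat.digits 10 m).takeWhile (fun d => d == 0) = Nat.digits 10 m :=
      (List.takeWhile_prefix (l := Nat.digits 10 m) (fun d => d == 0)).eq_of_length (by
        unfold Z at hge hle; omega)
    have hall : ∀ d ∈ Nat.digits 10 m, (d == 0) = true := List.takeWhile_eq_self_iff.mp heq
    have hne : (Nat.digits 10 m).getLast (Nat.digits_ne_nil_iff_ne_zero.mpr (by omega)) ≠ 0 :=
      Nat.getLast_digit_ne_zero 10 (by omega)
    exact hne (by simpa using hall _ (List.getLast_mem _))

-- B computes Z of |n| for nonzero n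
theorem alt_eq_Z (n : Int) (hn : n ≠ 0) :
    count_trailing_zeros_alt n = (Z n.natAbs : Int) := by
  have hpos : 0 < n.natAbs := Int.natAbs_pos.mpr hn
  have key : (((PySem.Int.toChars n).reverse).takeWhile (fun c => c == '0')).length = Z n.natAbs := by
    by_cases hneg : n < 0
    · have : PySem.Int.toChars n = '-' :: Nat.toDigits 10 n.natAbs := by
        simp [PySem.Int.toChars, hneg]
      rw [this]
      simp only [List.reverse_cons]
      rw [List.takeWhile_append]
      have hlt := Z_lt_length n.natAbs hpos
      have hlen : ((Nat.toDigits 10 n.natAbs).reverse.takeWhile (fun c => c == '0')).length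
          = Z n.natAbs := takeWhile_rev_toDigits n.natAbs hpos
      have hL : (Nat.toDigits 10 n.natAbs).reverse.length = (Nat.digits 10 n.natAbs).length := by
        rw [toDigits_eq n.natAbs hpos]; simp
      split
      · next hcond =>
          exfalso
          rw [hlen, List.length_reverse] at hcond
          rw [toDigits_eq n.natAbs hpos, List.length_reverse, List.length_map] at hcond
          omega
      · exact hlen
    · have h0 : 0 ≤ n := by omega
      have : PySem.Int.toChars n = Nat.toDigits 10 n.toNat := by
        simp [PySem.Int.toChars, hneg]
      rw [this]
      have : n.toNat = n.natAbs := by omega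
      rw [this]
      exact takeWhile_rev_toDigits n.natAbs hpos
  show ((PySem.Int.toChars n).length : Int)
      - (((PySem.Int.toChars n).reverse.dropWhile (fun c => c == '0')).reverse.length : Int)
      = (Z n.natAbs : Int)
  have hsplit : (((PySem.Int.toChars n).reverse.takeWhile (fun c => c == '0')).length : Nat)
      + ((PySem.Int.toChars n).reverse.dropWhile (fun c => c == '0')).length
      = (PySem.Int.toChars n).length := by
    conv_rhs => rw [← List.length_reverse,
      ← List.takeWhile_append_dropWhile (p := fun c => c == '0') (l := (PySem.Int.toChars n).reverse)]
    rw [List.length_append]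
  rw [List.length_reverse]
  omega

-- Z recursion matching A's loop body
theorem Z_of_not_dvd (m : Nat) (h0 : 0 < m) (h : m % 10 ≠ 0) : Z m = 0 := by
  rw [Z, Nat.digits_def' (by norm_num : 1 < 10) h0]
  simp [h]

theorem Z_of_dvd (m : Nat) (h0 : 0 < m) (h : m % 10 = 0) : Z m = Z (m / 10) + 1 := by
  rw [Z, Nat.digits_def' (by norm_num : 1 < 10) h0, h]
  simp [Z]

theorem mod10_zero_iff (n : Int) : PySem.Int.mod n 10 = 0 ↔ (10 : Int) ∣ n :=
  PySem.Int.mod_eq_zero_iff_dvd n 10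

theorem ctzLoop_eq (fuel : Nat) (n c : Int) (hn : n ≠ 0) (hf : n.natAbs ≤ fuel) :
    ctzLoop fuel n c = c + (Z n.natAbs : Int) := by
  induction fuel generalizing n c with
  | zero => omega
  | succ fuel ih =>
    simp only [ctzLoop]
    by_cases hmod : PySem.Int.mod n 10 = 0
    · obtain ⟨k, rfl⟩ := (mod10_zero_iff n).mp hmod
      have hk : k ≠ 0 := by rintro rfl; simp at hn
      have hdiv : PySem.Int.floordiv (10 * k) 10 = k := by
        simp [PySem.Int.floordiv, Int.mul_fdiv_cancel_left _ (by norm_num : (10 : Int) ≠ 0)]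
      have habs : (10 * k).natAbs = 10 * k.natAbs := by
        simp [Int.natAbs_mul]
      have hkpos : 0 < k.natAbs := Int.natAbs_pos.mpr hk
      rw [hmod, if_pos rfl, hdiv, ih k (c + 1) hk (by omega)]
      have hz : Z (10 * k).natAbs = Z k.natAbs + 1 := by
        rw [habs, Z_of_dvd (10 * k.natAbs) (by omega) (by omega)]
        congr 1
        congr 1
        omega
      rw [hz]
      push_cast
      ring
    · rw [if_neg hmod]
      have h10 : ¬ (10 : Int) ∣ n := fun hd => hmod ((mod10_zero_iff n).mpr hd)
      have hm : n.natAbs % 10 ≠ 0 := by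
        intro h
        exact h10 (Int.natAbs_dvd_natAbs.mp (by simpa using Nat.dvd_of_mod_eq_zero h))
      rw [Z_of_not_dvd n.natAbs (Int.natAbs_pos.mpr hn) hm]
      simp

-- ===== VERDICT (by name: the statement is the Claim_ definition above) =====
theorem count_trailing_zeros_spec : Claim_equal_count_trailing_zeros := by
  intro number _
  unfold Spec_count_trailing_zeros count_trailing_zeros
  by_cases h0 : number = 0
  · subst h0; decide
  · rw [if_neg h0, ctzLoop_eq number.natAbs number 0 h0 (le_refl _), alt_eq_Z number h0]
    simp
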